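-- pv_equiv track=rewrite | github.com/Jeevavarshini/ALGOTUTOR_ASSIGNMENTS | HelpFromSam.py | br
-- ===== SOURCE A (Python) =====
-- def br(arr, targetsum):
--     n = len(arr)
--     for i in range(1 << n):
--         bitwiseor = 0
--         for j in range(n):
--             if i & (1 << j):
--                 bitwiseor |= arr[j]
--         if bitwiseor == targetsum:
--             return True
--     return False
-- ===== SOURCE B (Python) =====
-- def br(arr, targetsum):
--     # A subset with bitwise OR == targetsum exists iff the OR of all
--     # elements that are submasks of targetsum equals targetsum.
--     acc = 0
--     for x in arr:
--         if x | targetsum == targetsum: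
--             acc |= x
--     return acc == targetsum
-- ===== Notes on version B (the rewrite author's own statement) =====
-- stated objective: faster
-- what changed: Replaces the exhaustive scan over all 2^n subset masks with a single pass that ORs together every element that is a submask of the target and checks whether that OR equals the target.
import Mathlib
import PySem

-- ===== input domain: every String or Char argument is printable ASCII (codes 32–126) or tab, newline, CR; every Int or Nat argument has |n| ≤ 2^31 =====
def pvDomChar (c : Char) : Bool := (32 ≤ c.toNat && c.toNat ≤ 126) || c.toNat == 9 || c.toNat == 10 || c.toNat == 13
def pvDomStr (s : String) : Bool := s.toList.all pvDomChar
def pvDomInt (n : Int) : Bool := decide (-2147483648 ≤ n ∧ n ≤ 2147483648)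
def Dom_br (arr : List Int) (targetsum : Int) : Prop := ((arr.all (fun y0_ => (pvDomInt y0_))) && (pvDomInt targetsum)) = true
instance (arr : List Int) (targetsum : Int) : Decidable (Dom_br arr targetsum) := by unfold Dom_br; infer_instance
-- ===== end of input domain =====

-- B replaces A's scan over all 2^n subset masks with one O(n) pass:
-- OR together the elements that are submasks of the target and compare with the target.

-- ===== PORT A =====
-- Python `|`, `&`, `<<` on int are Int.lor, Int.land, `<<<` (exact);
-- arr[j] is accessed only for 0 ≤ j < len(arr), where PySem.List.pyGetD is exact;
-- `.any` short-circuits exactly like A's early `return True`.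
def br (arr : List Int) (targetsum : Int) : Bool :=
  let n : Int := (arr.length : Int)
  (PySem.List.pyRange 0 ((1 : Int) <<< n) 1).any (fun i =>
    ((PySem.List.pyRange 0 n 1).foldl
      (fun bitwiseor j =>
        if Int.land i ((1 : Int) <<< j) ≠ 0 then
          Int.lor bitwiseor (PySem.List.pyGetD arr j 0)
        else bitwiseor) 0) == targetsum)

-- ===== PORT B =====
def br_alt (arr : List Int) (targetsum : Int) : Bool :=
  (arr.foldl
    (fun acc x => if Int.lor x targetsum == targetsum then Int.lor acc x else acc) 0)
    == targetsum

-- ===== PRECONDITION & SPEC =====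
def Spec_br (arr : List Int) (targetsum : Int) (out : Bool) : Prop := out = br_alt arr targetsum
instance (arr : List Int) (targetsum : Int) (out : Bool) : Decidable (Spec_br arr targetsum out) := by unfold Spec_br; infer_instance

-- ===== CLAIM (what is proved, stated in full; the proofs are below) =====
def Claim_equal_br : Prop := ∀ (arr : List Int) (targetsum : Int), Dom_br arr targetsum → Spec_br arr targetsum (br arr targetsum)

-- ===== LEMMAS AND PROOFS =====

-- Two integers with the same bits are equal.
theorem pv_int_ext {m n : Int} (h : ∀ k, m.testBit k = n.testBit k) : m = n := by
  cases m with
  | ofNat a => cases n with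
    | ofNat b => exact congrArg Int.ofNat (Nat.eq_of_testBit_eq h)
    | negSucc b =>
        exfalso
        have h1 := h (a + b + 1)
        have ha : a.testBit (a + b + 1) = false := Nat.testBit_lt_two_pow (by
          calc a < 2 ^ a := Nat.lt_two_pow_self
          _ ≤ 2 ^ (a + b + 1) := Nat.pow_le_pow_right (by omega) (by omega))
        have hb : b.testBit (a + b + 1) = false := Nat.testBit_lt_two_pow (by
          calc b < 2 ^ b := Nat.lt_two_pow_self
          _ ≤ 2 ^ (a + b + 1) := Nat.pow_le_pow_right (by omega) (by omega))
        rw [show ((Int.ofNat a).testBit (a + b + 1)) = a.testBit (a + b + 1) from rfl,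
            show ((Int.negSucc b).testBit (a + b + 1)) = !(b.testBit (a + b + 1)) from rfl,
            ha, hb] at h1
        simp at h1
  | negSucc a => cases n with
    | ofNat b =>
        exfalso
        have h1 := h (a + b + 1)
        have ha : a.testBit (a + b + 1) = false := Nat.testBit_lt_two_pow (by
          calc a < 2 ^ a := Nat.lt_two_pow_self
          _ ≤ 2 ^ (a + b + 1) := Nat.pow_le_pow_right (by omega) (by omega))
        have hb : b.testBit (a + b + 1) = false := Nat.testBit_lt_two_pow (by
          calc b < 2 ^ b := Nat.lt_two_pow_self
          _ ≤ 2 ^ (a + b + 1) := Nat.pow_le_pow_right (by omega) (by omega))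
        rw [show ((Int.ofNat b).testBit (a + b + 1)) = b.testBit (a + b + 1) from rfl,
            show ((Int.negSucc a).testBit (a + b + 1)) = !(a.testBit (a + b + 1)) from rfl,
            ha, hb] at h1
        simp at h1
    | negSucc b =>
        have hab : a = b := Nat.eq_of_testBit_eq (fun i => by
          have hi := h i
          rw [show ((Int.negSucc a).testBit i) = !(a.testBit i) from rfl,
              show ((Int.negSucc b).testBit i) = !(b.testBit i) from rfl] at hi
          exact Bool.not_inj hi)
        rw [hab]

theorem pv_testBit_zero_int (k : Nat) : (0 : Int).testBit k = false := Nat.zero_testBit k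

theorem pv_lor_zero (a : Int) : Int.lor a 0 = a :=
  pv_int_ext (fun k => by rw [Int.testBit_lor, pv_testBit_zero_int, Bool.or_false])

theorem pv_zero_lor (a : Int) : Int.lor 0 a = a :=
  pv_int_ext (fun k => by rw [Int.testBit_lor, pv_testBit_zero_int, Bool.false_or])

theorem pv_lor_self (a : Int) : Int.lor a a = a :=
  pv_int_ext (fun k => by rw [Int.testBit_lor, Bool.or_self])

theorem pv_lor_comm (a b : Int) : Int.lor a b = Int.lor b a :=
  pv_int_ext (fun k => by rw [Int.testBit_lor, Int.testBit_lor, Bool.or_comm])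

theorem pv_lor_assoc (a b c : Int) : Int.lor (Int.lor a b) c = Int.lor a (Int.lor b c) :=
  pv_int_ext (fun k => by simp only [Int.testBit_lor, Bool.or_assoc])

theorem pv_lor_left_comm (a b c : Int) : Int.lor a (Int.lor b c) = Int.lor b (Int.lor a c) := by
  rw [← pv_lor_assoc, pv_lor_comm a b, pv_lor_assoc]

-- submask decomposition: a ||| b ⊑ t iff a ⊑ t and b ⊑ t
theorem pv_sub_left {a b t : Int} (h : Int.lor (Int.lor a b) t = t) : Int.lor a t = t := by
  have habs : Int.lor a (Int.lor a b) = Int.lor a b := by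
    rw [← pv_lor_assoc, pv_lor_self]
  calc Int.lor a t = Int.lor a (Int.lor (Int.lor a b) t) := by rw [h]
    _ = Int.lor (Int.lor a (Int.lor a b)) t := (pv_lor_assoc ..).symm
    _ = Int.lor (Int.lor a b) t := by rw [habs]
    _ = t := h

theorem pv_sub_right {a b t : Int} (h : Int.lor (Int.lor a b) t = t) : Int.lor b t = t :=
  pv_sub_left (a := b) (b := a) (by rwa [pv_lor_comm b a])

-- the OR selected by the bits of a Nat mask (bit 0 ↔ head)
def pvSelOr : List Int → Nat → Int
  | [], _ => 0
  | x :: xs, m => Int.lor (if m.testBit 0 then x else 0) (pvSelOr xs (m >>> 1))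

-- the OR of the elements that are submasks of t
def pvG (t : Int) : List Int → Int
  | [] => 0
  | x :: xs => Int.lor (if Int.lor x t = t then x else 0) (pvG t xs)

theorem pvG_sub (t : Int) (l : List Int) : Int.lor (pvG t l) t = t := by
  induction l with
  | nil => exact pv_zero_lor t
  | cons x xs ih =>
      show Int.lor (Int.lor _ (pvG t xs)) t = t
      rw [pv_lor_assoc, ih]
      by_cases h : Int.lor x t = t <;> simp [h, pv_zero_lor]

theorem pv_sel_sub_g (t : Int) : ∀ (l : List Int) (m : Nat),
    Int.lor (pvSelOr l m) t = t → Int.lor (pvSelOr l m) (pvG t l) = pvG t l := by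
  intro l
  induction l with
  | nil => intro m _; exact pv_zero_lor _
  | cons x xs ih =>
      intro m hsub
      show Int.lor (Int.lor (if m.testBit 0 then x else 0) (pvSelOr xs (m >>> 1)))
             (Int.lor (if Int.lor x t = t then x else 0) (pvG t xs))
           = Int.lor (if Int.lor x t = t then x else 0) (pvG t xs)
      have hs : Int.lor (pvSelOr xs (m >>> 1)) t = t := pv_sub_right hsub
      have ihs := ih (m >>> 1) hs
      by_cases hb : m.testBit 0
      · have hx : Int.lor x t = t := by
          have := pv_sub_left hsub; rwa [if_pos hb] at this
        rw [if_pos hb, if_pos hx]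
        apply pv_int_ext; intro k
        have hbit := congrArg (fun z => Int.testBit z k) ihs
        simp only [Int.testBit_lor] at hbit ⊢
        cases hxx : x.testBit k <;> simp_all
      · rw [if_neg hb, pv_zero_lor]
        rw [pv_lor_left_comm]
        rw [ihs]

theorem pv_g_reachable (t : Int) : ∀ (l : List Int),
    ∃ m, m < 2 ^ l.length ∧ pvSelOr l m = pvG t l := by
  intro l
  induction l with
  | nil => exact ⟨0, by simp, rfl⟩
  | cons x xs ih =>
      obtain ⟨m', hm', hsel⟩ := ih
      refine ⟨2 * m' + (if Int.lor x t = t then 1 else 0), ?_, ?_⟩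
      · have : (2:Nat) ^ (x :: xs).length = 2 * 2 ^ xs.length := by
          simp [List.length_cons, pow_succ]; ring
        rw [this]
        by_cases h : Int.lor x t = t <;> simp [h] <;> omega
      · show Int.lor (if (2 * m' + (if Int.lor x t = t then 1 else 0)).testBit 0 then x else 0)
               (pvSelOr xs ((2 * m' + (if Int.lor x t = t then 1 else 0)) >>> 1))
             = Int.lor (if Int.lor x t = t then x else 0) (pvG t xs)
        have hshift : (2 * m' + (if Int.lor x t = t then 1 else 0)) >>> 1 = m' := by
          rw [Nat.shiftRight_one]
          by_cases h : Int.lor x t = t <;> simp [h] <;> omega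
        have hbit : (2 * m' + (if Int.lor x t = t then 1 else 0)).testBit 0
            = decide (Int.lor x t = t) := by
          rw [Nat.testBit_zero]
          by_cases h : Int.lor x t = t <;> simp [h] <;> omega
        rw [hshift, hsel, hbit]
        by_cases h : Int.lor x t = t <;> simp [h]

-- A's bit test, at nonnegative i = ↑p, tests bit k of p
theorem pv_bit_cond (p k : Nat) :
    (Int.land (p : Int) ((1 : Int) <<< (k : Int)) ≠ 0) ↔ p.testBit k = true := by
  have h1 : (1 : Int) <<< (k : Int) = ((1 <<< k : Nat) : Int) := by
    exact_mod_cast Int.shiftLeft_natCast 1 k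
  have h2 : Int.land (p : Int) ((1 <<< k : Nat) : Int) = ((p &&& (1 <<< k) : Nat) : Int) := rfl
  rw [h1, h2]
  rw [show ((1 : Nat) <<< k) = 2 ^ k by rw [Nat.shiftLeft_eq]; ring]
  rw [Nat.and_two_pow]
  rcases hb : p.testBit k <;> simp

-- A's inner loop from index k onward ORs onto the accumulator the elements of
-- arr.drop k selected by the bits of p >>> k
theorem pv_inner_aux (arr : List Int) (p : Nat) :
    ∀ (d k : Nat) (b : Int), arr.length - k = d → k ≤ arr.length →
    (PySem.List.pyRange (k : Int) (arr.length : Int) 1).foldl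
      (fun bitwiseor j =>
        if Int.land (p : Int) ((1 : Int) <<< j) ≠ 0 then
          Int.lor bitwiseor (PySem.List.pyGetD arr j 0)
        else bitwiseor) b
    = Int.lor b (pvSelOr (arr.drop k) (p >>> k)) := by
  intro d
  induction d with
  | zero =>
      intro k b hd hk
      have hk' : k = arr.length := by omega
      subst hk'
      rw [PySem.List.pyRange_one_eq_nil (le_refl _)]
      simp [List.drop_length, pvSelOr, pv_lor_zero]
  | succ d ihd =>
      intro k b hd hk
      have hklt : k < arr.length := by omega
      have hkl : (k : Int) < (arr.length : Int) := by exact_mod_cast hklt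
      rw [PySem.List.pyRange_one_cons hkl]
      rw [List.foldl_cons]
      have hcast : ((k : Int) + 1) = (((k + 1 : Nat)) : Int) := by push_cast; ring
      rw [hcast]
      rw [ihd (k + 1) _ (by omega) (by omega)]
      rw [List.drop_eq_getElem_cons hklt]
      show Int.lor (if Int.land (p : Int) ((1 : Int) <<< (k : Int)) ≠ 0 then
              Int.lor b (PySem.List.pyGetD arr (k : Int) 0) else b)
            (pvSelOr (arr.drop (k + 1)) (p >>> (k + 1)))
          = Int.lor b (Int.lor (if (p >>> k).testBit 0 then arr[k] else 0)
              (pvSelOr (arr.drop (k + 1)) ((p >>> k) >>> 1)))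
      have hget : PySem.List.pyGetD arr (k : Int) 0 = arr[k] := by
        rw [PySem.List.pyGetD_eq_getElem arr 0 (by positivity) (by exact_mod_cast hklt)]
        simp
      have hb0 : (p >>> k).testBit 0 = p.testBit k := by
        rw [Nat.testBit_shiftRight, Nat.add_zero]
      have hsh : (p >>> k) >>> 1 = p >>> (k + 1) := by
        rw [← Nat.shiftRight_add]
      rw [hget, hb0, hsh]
      by_cases hc : p.testBit k
      · rw [if_pos ((pv_bit_cond p k).mpr hc), if_pos hc, pv_lor_assoc]
      · rw [if_neg (fun hne => by rw [(pv_bit_cond p k).mp hne] at hc; exact hc rfl),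
            if_neg hc, pv_zero_lor]

theorem pv_inner (arr : List Int) (p : Nat) :
    (PySem.List.pyRange 0 (arr.length : Int) 1).foldl
      (fun bitwiseor j =>
        if Int.land (p : Int) ((1 : Int) <<< j) ≠ 0 then
          Int.lor bitwiseor (PySem.List.pyGetD arr j 0)
        else bitwiseor) 0
    = pvSelOr arr p := by
  have := pv_inner_aux arr p arr.length 0 0 (by omega) (by omega)
  rw [show ((0:Nat) : Int) = (0 : Int) from rfl] at this
  rw [this, pv_zero_lor, List.drop_zero, Nat.shiftRight_zero]

-- A returns true iff some mask below 2^n selects an OR equal to the target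
theorem pv_br_iff (arr : List Int) (t : Int) :
    br arr t = true ↔ ∃ p : Nat, p < 2 ^ arr.length ∧ pvSelOr arr p = t := by
  unfold br
  rw [List.any_eq_true]
  constructor
  · rintro ⟨i, hmem, hi⟩
    rw [PySem.List.mem_pyRange_one] at hmem
    obtain ⟨p, rfl⟩ := Int.eq_ofNat_of_zero_le hmem.1
    have hb := hmem.2
    rw [show (1 : Int) <<< ((arr.length : Nat) : Int) = ((1 <<< arr.length : Nat) : Int) by
          exact_mod_cast Int.shiftLeft_natCast 1 arr.length] at hb
    have hplt : p < 1 <<< arr.length := by exact_mod_cast hb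
    rw [Nat.shiftLeft_eq, one_mul] at hplt
    refine ⟨p, hplt, ?_⟩
    rw [pv_inner arr p] at hi
    exact of_decide_eq_true hi
  · rintro ⟨p, hp, hsel⟩
    refine ⟨(p : Int), ?_, ?_⟩
    · rw [PySem.List.mem_pyRange_one]
      refine ⟨by positivity, ?_⟩
      rw [show (1 : Int) <<< ((arr.length : Nat) : Int) = ((1 <<< arr.length : Nat) : Int) by
            exact_mod_cast Int.shiftLeft_natCast 1 arr.length]
      rw [Nat.shiftLeft_eq, one_mul]
      exact_mod_cast hp
    · rw [pv_inner arr p, hsel]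
      exact decide_eq_true rfl

-- B's fold with accumulator b equals b ||| pvG t arr
theorem pv_foldlB (t : Int) : ∀ (l : List Int) (b : Int),
    l.foldl (fun acc x => if Int.lor x t == t then Int.lor acc x else acc) b
    = Int.lor b (pvG t l) := by
  intro l
  induction l with
  | nil => intro b; exact (pv_lor_zero b).symm
  | cons x xs ih =>
      intro b
      rw [List.foldl_cons, ih]
      show Int.lor (if Int.lor x t == t then Int.lor b x else b) (pvG t xs)
          = Int.lor b (Int.lor (if Int.lor x t = t then x else 0) (pvG t xs))
      by_cases h : Int.lor x t = t
      · simp only [h, BEq.rfl, if_true, pv_lor_assoc]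
      · rw [if_neg (by simpa using h), if_neg h, pv_zero_lor]

theorem pv_br_alt_iff (arr : List Int) (t : Int) :
    br_alt arr t = true ↔ pvG t arr = t := by
  unfold br_alt
  rw [pv_foldlB t arr 0, pv_zero_lor]
  exact ⟨of_decide_eq_true, fun h => decide_eq_true h⟩

-- ===== VERDICT (by name: the statement is the Claim_ definition above) =====
theorem br_spec : Claim_equal_br := by
  intro arr t _
  unfold Spec_br
  rw [Bool.eq_iff_iff, pv_br_iff, pv_br_alt_iff]
  constructor
  · rintro ⟨p, _, hsel⟩
    have hsub : Int.lor (pvSelOr arr p) t = t := by rw [hsel]; exact pv_lor_self t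
    have h1 : Int.lor (pvSelOr arr p) (pvG t arr) = pvG t arr := pv_sel_sub_g t arr p hsub
    have h2 : Int.lor (pvG t arr) t = t := pvG_sub t arr
    rw [hsel] at h1
    rw [pv_lor_comm] at h1
    rw [h1] at h2
    exact h2
  · intro hg
    obtain ⟨m, hm, hsel⟩ := pv_g_reachable t arr
    exact ⟨m, hm, by rw [hsel, hg]⟩
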